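-- pv_equiv track=rewrite | github.com/eliautobot/my-virtual-office | app/server.py | _wf_find_column
-- ===== SOURCE A (Python) =====
-- def _wf_find_column(project, title_lower):
--     """Find a column by title (case-insensitive). Tries exact match first, then contains."""
--     cols = project.get("columns", [])
--     # Exact match first
--     for col in cols:
--         if col.get("title", "").lower() == title_lower:
--             return col
--     # Fallback: column title contains the keyword (e.g. "Code Review" matches "review")
--     for col in cols:
--         if title_lower in col.get("title", "").lower():
--             return col
--     return None
-- ===== SOURCE B (Python) =====
-- def _wf_find_column(project, title_lower):
--     """Single pass: return on exact match; remember first substring hit as fallback."""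
--     fallback = None
--     for col in project.get("columns", []):
--         t = col.get("title", "").lower()
--         if t == title_lower:
--             return col
--         if fallback is None and title_lower in t:
--             fallback = col
--     return fallback
-- ===== Notes on version B (the rewrite author's own statement) =====
-- stated objective: alternative
-- what changed: Replaced A's two sequential scans (exact pass, then substring pass) by a single pass that lower-cases each title once, returns immediately on an exact match and records the first substring hit in a fallback variable returned after the loop.
import Mathlib
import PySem

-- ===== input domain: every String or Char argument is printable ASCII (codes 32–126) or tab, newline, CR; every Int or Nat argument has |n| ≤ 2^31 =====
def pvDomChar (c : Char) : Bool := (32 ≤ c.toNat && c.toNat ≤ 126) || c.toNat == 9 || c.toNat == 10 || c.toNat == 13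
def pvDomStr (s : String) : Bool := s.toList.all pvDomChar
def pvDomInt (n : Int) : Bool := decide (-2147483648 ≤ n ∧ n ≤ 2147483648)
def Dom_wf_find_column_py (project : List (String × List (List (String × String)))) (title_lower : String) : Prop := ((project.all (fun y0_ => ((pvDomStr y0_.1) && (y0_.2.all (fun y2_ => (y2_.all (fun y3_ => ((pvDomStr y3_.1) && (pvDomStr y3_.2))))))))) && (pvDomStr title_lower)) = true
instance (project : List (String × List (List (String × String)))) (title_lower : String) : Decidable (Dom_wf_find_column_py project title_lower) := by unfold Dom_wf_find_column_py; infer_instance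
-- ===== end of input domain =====

-- B rewrites A's two sequential scans as one pass with a fallback accumulator (objective: alternative, same cost).

-- ===== PORT A =====
-- first loop of A: exact match on the lower-cased title
def pvA_exact (cols : List (List (String × String))) (title_lower : String) : Option (List (String × String)) :=
  match cols with
  | [] => none
  | c :: rest =>
    if PySem.Str.lower ((PySem.Dict.mk c).getD "title" "") == title_lower then some c
    else pvA_exact rest title_lower

-- second loop of A: substring match
def pvA_sub (cols : List (List (String × String))) (title_lower : String) : Option (List (String × String)) :=
  match cols with
  | [] => none
  | c :: rest =>
    if PySem.Str.isIn title_lower (PySem.Str.lower ((PySem.Dict.mk c).getD "title" "")) then some c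
    else pvA_sub rest title_lower

def wf_find_column_py (project : List (String × List (List (String × String)))) (title_lower : String) : Option (List (String × String)) :=
  let cols := (PySem.Dict.mk project).getD "columns" []
  match pvA_exact cols title_lower with
  | some c => some c
  | none => pvA_sub cols title_lower

-- ===== PORT B =====
-- single pass: return on exact match, record first substring hit in the fallback
def pvB_loop (cols : List (List (String × String))) (title_lower : String)
    (fallback : Option (List (String × String))) : Option (List (String × String)) :=
  match cols with
  | [] => fallback
  | c :: rest =>
    let t := PySem.Str.lower ((PySem.Dict.mk c).getD "title" "")
    if t == title_lower then some c
    else pvB_loop rest title_lower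
      (if fallback.isNone && PySem.Str.isIn title_lower t then some c else fallback)

def wf_find_column_py_alt (project : List (String × List (List (String × String)))) (title_lower : String) : Option (List (String × String)) :=
  pvB_loop ((PySem.Dict.mk project).getD "columns" []) title_lower none

-- ===== PRECONDITION & SPEC =====
def Spec_wf_find_column_py (project : List (String × List (List (String × String)))) (title_lower : String) (out : Option (List (String × String))) : Prop := out = wf_find_column_py_alt project title_lower
instance (project : List (String × List (List (String × String)))) (title_lower : String) (out : Option (List (String × String))) : Decidable (Spec_wf_find_column_py project title_lower out) := by unfold Spec_wf_find_column_py; infer_instance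

-- ===== CLAIM (what is proved, stated in full; the proofs are below) =====
def Claim_equal_wf_find_column_py : Prop := ∀ (project : List (String × List (List (String × String)))) (title_lower : String), Dom_wf_find_column_py project title_lower → Spec_wf_find_column_py project title_lower (wf_find_column_py project title_lower)

-- ===== LEMMAS AND PROOFS =====

-- B's loop, with any pending fallback, equals: A's exact scan; else the fallback; else A's substring scan.
theorem pvB_loop_eq (cols : List (List (String × String))) (title_lower : String)
    (fb : Option (List (String × String))) :
    pvB_loop cols title_lower fb =
      match pvA_exact cols title_lower with
      | some c => some c
      | none => match fb with
                | some f => some f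
                | none => pvA_sub cols title_lower := by
  induction cols generalizing fb with
  | nil => cases fb <;> rfl
  | cons c rest ih =>
    simp only [pvB_loop, pvA_exact, pvA_sub]
    cases hx : (PySem.Str.lower ((PySem.Dict.mk c).getD "title" "") == title_lower) with
    | true => simp
    | false =>
      simp only [Bool.false_eq_true, if_false]
      cases fb with
      | some f =>
        rw [ih]
        cases pvA_exact rest title_lower <;> simp
      | none =>
        cases hs : PySem.Str.isIn title_lower (PySem.Str.lower ((PySem.Dict.mk c).getD "title" "")) with
        | true =>
          simp only [Option.isNone_none, Bool.true_and, if_true]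
          rw [ih]
        | false =>
          simp only [Option.isNone_none, Bool.true_and, Bool.false_eq_true, if_false]
          rw [ih]

-- ===== VERDICT (by name: the statement is the Claim_ definition above) =====
theorem wf_find_column_py_spec : Claim_equal_wf_find_column_py := by
  intro project title_lower _
  unfold Spec_wf_find_column_py wf_find_column_py wf_find_column_py_alt
  rw [pvB_loop_eq]
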